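-- pv_equiv track=rewrite | github.com/farazlfc/CP | sirija_suffixes.py | f
-- ===== SOURCE A (Python) =====
-- def f(s1,s2,a,b,k):
--     #replace - b
--     #add - a
--     #remove - a
--     m = len(s1)
--     n = len(s2)
--     if m == 0 and n == 0:
--         return 0
--     x = 1
--     c = 1
--
--     dp = [[0 for _ in range(n+1)]  for _ in range(2)]
--     for i in range(0,n+1):
--         dp[0][i] = a*i
--     while c<= m:
--         for i in range(0,n+1):
--             if i == 0:
--                 dp[x][i] = c*a
--             elif s1[c-1] == s2[i-1]:
--                 dp[x][i] = dp[1-x][i-1]  #mod this, think of cases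
--             else:
--                 dp[x][i] = min(dp[1-x][i-1] + b, dp[1-x][i] + a , dp[x][i-1]+a)
--         c+=1
--         x = 1-x   #this got changed at the end
--     if dp[1-x][n] <= k:
--         return dp[1-x][n]
--     return -1
-- ===== SOURCE B (Python) =====
-- def f(s1, s2, a, b, k):
--     # Top-down memoized recursion on prefix lengths (vs A's bottom-up two-row table).
--     memo = {}
--     def cost(i, j):
--         key = (i, j)
--         if key not in memo:
--             if i == 0:
--                 memo[key] = a * j
--             elif j == 0:
--                 memo[key] = a * i
--             elif s1[i - 1] == s2[j - 1]:
--                 memo[key] = cost(i - 1, j - 1)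
--             else:
--                 memo[key] = min(cost(i - 1, j - 1) + b,
--                                 cost(i - 1, j) + a,
--                                 cost(i, j - 1) + a)
--         return memo[key]
--     d = cost(len(s1), len(s2))
--     return d if d <= k else -1
-- ===== Notes on version B (the rewrite author's own statement) =====
-- stated objective: alternative
-- what changed: Same weighted edit-distance recurrence but computed by top-down memoized recursion on prefix lengths (a dict cache filled on demand) instead of A's bottom-up iteration over a two-row rolling table with an x-toggle; B also drops A's both-empty early return.
-- intended difference: When both strings are empty and k < 0, A's early return yields 0 even though the distance 0 exceeds the cap k, while B returns the intended -1 (distance above the cap). — e.g. on f("", "", 1, 1, -1): A returns 0, B returns -1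
import Mathlib
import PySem

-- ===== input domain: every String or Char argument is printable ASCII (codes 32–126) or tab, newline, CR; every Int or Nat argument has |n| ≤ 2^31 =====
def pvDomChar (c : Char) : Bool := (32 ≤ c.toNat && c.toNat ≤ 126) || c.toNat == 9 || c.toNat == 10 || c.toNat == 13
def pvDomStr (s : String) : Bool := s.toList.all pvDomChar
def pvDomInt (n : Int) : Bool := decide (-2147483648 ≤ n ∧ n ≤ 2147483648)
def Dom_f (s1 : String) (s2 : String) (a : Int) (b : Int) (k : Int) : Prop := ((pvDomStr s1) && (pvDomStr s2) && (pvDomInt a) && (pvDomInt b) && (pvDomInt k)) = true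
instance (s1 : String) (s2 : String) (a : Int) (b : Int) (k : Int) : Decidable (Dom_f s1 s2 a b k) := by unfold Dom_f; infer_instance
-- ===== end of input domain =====

-- B recomputes the same weighted edit distance by top-down memoized recursion on prefix lengths
-- instead of A's bottom-up two-row rolling table, and drops A's special case for two empty strings.

-- ===== PORT A =====
-- A's inner for-loop (i = 1..n): walks the previous row (dp[1-x]) together with s2,
-- carrying the last written entry of the current row (dp[x][i-1]) as `left`.
def fillA (a b : Int) (ch : Char) : Int → List Int → List Char → List Int
  | left, p0 :: p1 :: ps, d :: ds =>
      let v := if ch = d then p0 else min (min (p0 + b) (p1 + a)) (left + a)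
      v :: fillA a b ch v (p1 :: ps) ds
  | _, _, _ => []

-- A's while-loop: c counts processed chars of s1, dp is the previous row (the x-toggle
-- becomes: the freshly built row is the next loop state).
def loopA (a b : Int) (t2 : List Char) : List Char → Nat → List Int → List Int
  | [], _, dp => dp
  | ch :: cs, c, dp => loopA a b t2 cs (c + 1) (((c : Int) * a) :: fillA a b ch ((c : Int) * a) dp t2)

def f (s1 : String) (s2 : String) (a : Int) (b : Int) (k : Int) : Int :=
  let t1 := s1.toList
  let t2 := s2.toList
  let m := t1.length
  let n := t2.length
  if m = 0 ∧ n = 0 then 0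
  else
    -- dp[0][i] = a*i for i in range(0, n+1)
    let dp0 := (List.range (n + 1)).map (fun (i : Nat) => a * (i : Int))
    let fin := loopA a b t2 t1 1 dp0
    let r := fin.getD n 0            -- dp[1-x][n]
    if r ≤ k then r else -1

-- ===== PORT B =====
-- Source B's inner `cost(i, j)`, ported as the recursion itself (the memo dict is a
-- value-transparent cache: it never changes what cost returns, only how often it recomputes).
-- The mutual dependence cost(i+1,j+1) -> cost(i+1,j) is expressed by the structural helper
-- rowB (the row at level i+1 given `prev` = cost(i, ·)); branches stay in Source B's order and the
-- unfolding lemma costB_succ_succ below shows costB satisfies Source B's recurrence verbatim.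
def rowB (a b : Int) (base : Int) (ci : Char) (t2 : List Char) (prev : Nat → Int) : Nat → Int
  | 0 => base
  | j + 1 =>
      if ci = t2.getD j ' ' then prev j
      else min (min (prev j + b) (prev (j + 1) + a)) (rowB a b base ci t2 prev j + a)

def costB (a b : Int) (t1 t2 : List Char) : Nat → Nat → Int
  | 0 => fun j => a * (j : Int)
  | i + 1 => rowB a b (a * ((i : Int) + 1)) (t1.getD i ' ') t2 (costB a b t1 t2 i)

def f_alt (s1 : String) (s2 : String) (a : Int) (b : Int) (k : Int) : Int :=
  let d := costB a b s1.toList s2.toList s1.toList.length s2.toList.length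
  if d ≤ k then d else -1

-- ===== PRECONDITION & SPEC =====
-- When both strings are empty and k < 0, A's early return yields 0 although the (zero) distance
-- exceeds the cap k, while B returns the intended cap-respecting -1.
def D_f (s1 : String) (s2 : String) (a : Int) (b : Int) (k : Int) : Prop :=
  s1 = "" ∧ s2 = "" ∧ k < 0
instance (s1 : String) (s2 : String) (a : Int) (b : Int) (k : Int) : Decidable (D_f s1 s2 a b k) := by
  unfold D_f; infer_instance

def Spec_f (s1 : String) (s2 : String) (a : Int) (b : Int) (k : Int) (out : Int) : Prop :=
  ¬ D_f s1 s2 a b k → out = f_alt s1 s2 a b k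
instance (s1 : String) (s2 : String) (a : Int) (b : Int) (k : Int) (out : Int) : Decidable (Spec_f s1 s2 a b k out) := by
  unfold Spec_f; infer_instance

def pvDiffWitness_f : String × String × Int × Int × Int := ("", "", 1, 1, -1)
def pvDiffWitnessOut_f : Int × Int := (0, -1)

-- ===== CLAIM (what is proved, stated in full; the proofs are below) =====
def Claim_unchanged_f : Prop := ∀ (s1 : String) (s2 : String) (a : Int) (b : Int) (k : Int), Dom_f s1 s2 a b k → Spec_f s1 s2 a b k (f s1 s2 a b k)
def Claim_changed_f : Prop := Dom_f (pvDiffWitness_f.1) (pvDiffWitness_f.2.1) (pvDiffWitness_f.2.2.1) (pvDiffWitness_f.2.2.2.1) (pvDiffWitness_f.2.2.2.2) ∧ D_f (pvDiffWitness_f.1) (pvDiffWitness_f.2.1) (pvDiffWitness_f.2.2.1) (pvDiffWitness_f.2.2.2.1) (pvDiffWitness_f.2.2.2.2) ∧ f (pvDiffWitness_f.1) (pvDiffWitness_f.2.1) (pvDiffWitness_f.2.2.1) (pvDiffWitness_f.2.2.2.1) (pvDiffWitness_f.2.2.2.2) = pvDiffWitnessOut_f.1 ∧ f_alt (pvDiffWitness_f.1)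 (pvDiffWitness_f.2.1) (pvDiffWitness_f.2.2.1) (pvDiffWitness_f.2.2.2.1) (pvDiffWitness_f.2.2.2.2) = pvDiffWitnessOut_f.2 ∧ pvDiffWitnessOut_f.1 ≠ pvDiffWitnessOut_f.2
def Claim_exact_f : Prop := ∀ (s1 : String) (s2 : String) (a : Int) (b : Int) (k : Int), Dom_f s1 s2 a b k → D_f s1 s2 a b k → f s1 s2 a b k ≠ f_alt s1 s2 a b k

-- ===== LEMMAS AND PROOFS =====

-- costB satisfies Source B's recurrence literally.
theorem costB_succ_succ (a b : Int) (t1 t2 : List Char) (i j : Nat) :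
    costB a b t1 t2 (i + 1) (j + 1) =
      if t1.getD i ' ' = t2.getD j ' ' then costB a b t1 t2 i j
      else min (min (costB a b t1 t2 i j + b) (costB a b t1 t2 i (j + 1) + a))
               (costB a b t1 t2 (i + 1) j + a) := by
  rfl

theorem fillA_spec (a b : Int) (t1 t2 : List Char) (c : Nat) :
    ∀ u j, j + u = t2.length →
    fillA a b (t1.getD c ' ') (costB a b t1 t2 (c + 1) j)
      ((List.range' j (t2.length + 1 - j)).map (fun i => costB a b t1 t2 c i)) (t2.drop j)
    = (List.range' (j + 1) (t2.length - j)).map (fun i => costB a b t1 t2 (c + 1) i) := by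
  intro u
  induction u with
  | zero =>
      intro j hj
      have hj' : j = t2.length := by omega
      subst hj'
      rw [show t2.length + 1 - t2.length = 1 from by omega,
          show t2.length - t2.length = 0 from by omega,
          List.range'_one, List.drop_length]
      simp [fillA]
  | succ u ih =>
      intro j hj
      have hjn : j < t2.length := by omega
      rw [List.drop_eq_getElem_cons hjn,
          show t2.length + 1 - j = (u + 1) + 1 from by omega, List.range'_succ,
          show u + 1 = u + 1 from rfl, List.range'_succ,
          show t2.length - j = u + 1 from by omega, List.range'_succ]
      simp only [List.map_cons]
      rw [fillA]
      have hv : (if t1.getD c ' ' = t2[j] then costB a b t1 t2 c j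
            else min (min (costB a b t1 t2 c j + b) (costB a b t1 t2 c (j+1) + a))
                     (costB a b t1 t2 (c + 1) j + a)) = costB a b t1 t2 (c+1) (j+1) := by
        rw [costB_succ_succ, List.getD_eq_getElem t2 ' ' hjn]
      rw [hv]
      congr 1
      have := ih (j + 1) (by omega)
      rw [show t2.length + 1 - (j + 1) = u + 1 from by omega, List.range'_succ,
          show t2.length - (j+1) = u from by omega] at this
      simpa using this

theorem loopA_spec (a b : Int) (t1 t2 : List Char) :
    ∀ cs c, cs = t1.drop c → c ≤ t1.length →
    loopA a b t2 cs (c + 1) ((List.range' 0 (t2.length + 1)).map (fun i => costB a b t1 t2 c i))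
    = (List.range' 0 (t2.length + 1)).map (fun i => costB a b t1 t2 t1.length i) := by
  intro cs
  induction cs with
  | nil =>
      intro c hc hcle
      have : c = t1.length := by
        have := List.drop_eq_nil_iff.mp hc.symm
        omega
      subst this
      simp [loopA]
  | cons ch cs' ih =>
      intro c hc hcle
      have hclt : c < t1.length := by
        by_contra hge
        have : t1.drop c = [] := List.drop_eq_nil_iff.mpr (by omega)
        rw [this] at hc; exact (List.cons_ne_nil _ _) hc
      rw [List.drop_eq_getElem_cons hclt] at hc
      obtain ⟨hch, hcs'⟩ := List.cons_eq_cons.mp hc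
      rw [loopA]
      have hhead : ((c + 1 : Nat) : Int) * a = costB a b t1 t2 (c + 1) 0 := by
        show ((c:Int)+1)*a = a*((c:Int)+1); ring
      have hfill := fillA_spec a b t1 t2 c t2.length 0 (by omega)
      simp only [Nat.sub_zero, List.drop_zero, Nat.zero_add] at hfill
      have hch' : ch = t1.getD c ' ' := by rw [List.getD_eq_getElem t1 ' ' hclt]; exact hch
      rw [hch', hhead, hfill]
      have hrow : costB a b t1 t2 (c + 1) 0 :: (List.range' 1 t2.length).map (fun i => costB a b t1 t2 (c + 1) i)
          = (List.range' 0 (t2.length + 1)).map (fun i => costB a b t1 t2 (c + 1) i) := by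
        rw [List.range'_succ, List.map_cons]
      rw [hrow]
      exact ih (c + 1) hcs' (by omega)

theorem f_eq_cost (s1 s2 : String) (a b k : Int)
    (h : ¬ (s1.toList.length = 0 ∧ s2.toList.length = 0)) :
    f s1 s2 a b k =
      (if costB a b s1.toList s2.toList s1.toList.length s2.toList.length ≤ k
       then costB a b s1.toList s2.toList s1.toList.length s2.toList.length else -1) := by
  have hdp0 : (List.range (s2.toList.length + 1)).map (fun (i : Nat) => a * (i : Int))
      = (List.range' 0 (s2.toList.length + 1)).map (fun i => costB a b s1.toList s2.toList 0 i) := by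
    rw [List.range_eq_range']
    exact List.map_congr_left (fun i _ => rfl)
  have hloop := loopA_spec a b s1.toList s2.toList s1.toList 0 (by simp) (by omega)
  simp only [Nat.zero_add] at hloop
  have hget : (((List.range' 0 (s2.toList.length + 1)).map
        (fun i => costB a b s1.toList s2.toList s1.toList.length i)).getD s2.toList.length 0)
      = costB a b s1.toList s2.toList s1.toList.length s2.toList.length := by
    have hlt : s2.toList.length <
        ((List.range' 0 (s2.toList.length + 1)).map
          (fun i => costB a b s1.toList s2.toList s1.toList.length i)).length := by
      simp
    rw [List.getD_eq_getElem _ _ hlt]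
    simp
  simp only [f, if_neg h]
  rw [hdp0, hloop, hget]

-- ===== VERDICT =====
theorem f_spec : Claim_unchanged_f := by
  intro s1 s2 a b k _hdom
  unfold Spec_f
  intro hnD
  by_cases hmn : s1.toList.length = 0 ∧ s2.toList.length = 0
  · have hs1 : s1 = "" := String.toList_eq_nil_iff.mp (List.length_eq_zero_iff.mp hmn.1)
    have hs2 : s2 = "" := String.toList_eq_nil_iff.mp (List.length_eq_zero_iff.mp hmn.2)
    subst hs1; subst hs2
    have hk : 0 ≤ k := by
      by_contra hk
      exact hnD ⟨rfl, rfl, by omega⟩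
    have hA : f "" "" a b k = 0 := by simp [f]
    have hB : f_alt "" "" a b k = 0 := by
      have h0 : costB a b "".toList "".toList "".toList.length "".toList.length = 0 := by
        show a * ((0:Nat) : Int) = 0
        simp
      simp only [f_alt, h0, if_pos hk]
    rw [hA, hB]
  · rw [f_eq_cost s1 s2 a b k hmn]
    simp only [f_alt]

theorem f_changed : Claim_changed_f := by
  unfold Claim_changed_f; decide

theorem f_tight : Claim_exact_f := by
  intro s1 s2 a b k _hdom hD
  obtain ⟨hs1, hs2, hk⟩ := hD
  subst hs1; subst hs2
  have hA : f "" "" a b k = 0 := by simp [f]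
  have hB : f_alt "" "" a b k = -1 := by
    have h0 : costB a b "".toList "".toList "".toList.length "".toList.length = 0 := by
      show a * ((0:Nat) : Int) = 0
      simp
    simp only [f_alt, h0, if_neg (by omega : ¬ (0 : Int) ≤ k)]
  rw [hA, hB]
  decide
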